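-- pv_equiv track=rewrite | github.com/YuriCat/test | algo/next_prm.py | next_phase_impl
-- ===== SOURCE A (Python) =====
-- def next_phase_impl(a, prev_pos, cnt):
--   if cnt == 0:
--     for i in range(prev_pos - 1, -1, -1):
--       if a[i] > 0:
--         prev_pos, cnt = i, a[i]
--         break
--
--   pos = next_phase_impl(a, prev_pos, cnt - 1) if cnt == 1 else (prev_pos + 1)
--   a[prev_pos] -= 1
--   a[pos] += 1
--   return pos
-- ===== SOURCE B (Python) =====
-- def next_phase_impl(a, prev_pos, cnt):
--     # Iterative re-implementation: resolve the whole cnt==1 chain with a while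
--     # loop (recording visited slots), then apply all mutations in one batch.
--     if cnt == 0:
--         for i in range(prev_pos - 1, -1, -1):
--             if a[i] > 0:
--                 prev_pos, cnt = i, a[i]
--                 break
--     chain = []
--     while cnt == 1:
--         chain.append(prev_pos)
--         nxt = None
--         for i in range(prev_pos - 1, -1, -1):
--             if a[i] > 0:
--                 nxt = i
--                 break
--         if nxt is None:
--             cnt = 0
--         else:
--             prev_pos, cnt = nxt, a[nxt]
--     pos = prev_pos + 1
--     for p in chain:
--         a[p] -= 1
--         a[pos] += 1
--     a[prev_pos] -= 1
--     a[pos] += 1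
--     return pos
-- ===== Notes on version B (the rewrite author's own statement) =====
-- stated objective: alternative
-- what changed: Replaces A's self-recursion (each cnt==1 level re-enters with cnt=0 and rescans) by an explicit while-loop that chases the cnt==1 chain iteratively, records the visited slots, and applies all array mutations in one batch at the end.
import Mathlib
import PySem

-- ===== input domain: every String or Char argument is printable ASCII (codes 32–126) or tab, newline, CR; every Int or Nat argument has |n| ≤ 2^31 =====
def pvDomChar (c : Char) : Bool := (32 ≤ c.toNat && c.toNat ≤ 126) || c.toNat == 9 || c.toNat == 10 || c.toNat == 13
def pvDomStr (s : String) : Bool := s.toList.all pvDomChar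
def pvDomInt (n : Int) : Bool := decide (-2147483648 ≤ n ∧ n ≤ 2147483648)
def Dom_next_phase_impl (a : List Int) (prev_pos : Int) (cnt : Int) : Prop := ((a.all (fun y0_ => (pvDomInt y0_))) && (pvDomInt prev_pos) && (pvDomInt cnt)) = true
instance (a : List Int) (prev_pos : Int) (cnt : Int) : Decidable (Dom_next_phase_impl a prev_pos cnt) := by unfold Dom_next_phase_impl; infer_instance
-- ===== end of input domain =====

-- B replaces A's recursion by an explicit chain-chasing loop with batched mutations;
-- both Pythons mutate `a` identically, and the equivalence proved here is about the RETURN value only.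

-- ===== PORT A =====
-- a[i] for an in-range index (Pre_ guarantees every index Python touches is in range)
def pvAget (a : List Int) (i : Int) : Int := PySem.List.pyGetD a i 0

-- A's `for i in range(prev_pos-1,-1,-1): if a[i] > 0: …; break` scan, as recursion over the range list
def pvFindPos (a : List Int) : List Int → Option Int
  | [] => none
  | i :: rest => if 0 < pvAget a i then some i else pvFindPos a rest

-- the `if cnt == 0:` block of A: possibly reassign (prev_pos, cnt) from the backward scan
def pvStepA (a : List Int) (p : Int) (c : Int) : Int × Int :=
  if c = 0 then
    match pvFindPos a (PySem.List.pyRange (p - 1) (-1) (-1)) with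
    | some i => (i, pvAget a i)
    | none => (p, c)
  else (p, c)

-- (termination facts for the port of A)
theorem pvFindPos_mem (a : List Int) (l : List Int) (i : Int) (h : pvFindPos a l = some i) : i ∈ l := by
  induction l with
  | nil => simp [pvFindPos] at h
  | cons x xs ih =>
    simp only [pvFindPos] at h
    split at h
    · cases h; exact List.mem_cons_self
    · exact List.mem_cons_of_mem _ (ih h)

theorem pvStepA_decr (a : List Int) (p c : Int)
    (h : (pvStepA a p c).2 = 1) :
    2 * (max (pvStepA a p c).1 0).toNat + (if (pvStepA a p c).2 - 1 = 1 then 1 else 0)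
      < 2 * (max p 0).toNat + (if c = 1 then 1 else 0) := by
  by_cases hc : c = 0
  · subst hc
    cases hm : pvFindPos a (PySem.List.pyRange (p - 1) (-1) (-1)) with
    | none => exfalso; simp [pvStepA, hm] at h
    | some i =>
      have hmem := pvFindPos_mem a _ i hm
      rw [PySem.List.mem_pyRange_neg_one] at hmem
      have h1 : pvAget a i = 1 := by simpa [pvStepA, hm] using h
      simp [pvStepA, hm, h1]
      omega
  · have h1 : c = 1 := by simpa [pvStepA, hc] using h
    subst h1
    simp [pvStepA]

-- the mutations a[prev_pos] -= 1; a[pos] += 1 happen AFTER the recursive call and do not affect the return value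
def next_phase_impl (a : List Int) (prev_pos : Int) (cnt : Int) : Int :=
  if h : (pvStepA a prev_pos cnt).2 = 1 then
    next_phase_impl a (pvStepA a prev_pos cnt).1 ((pvStepA a prev_pos cnt).2 - 1)
  else
    (pvStepA a prev_pos cnt).1 + 1
termination_by 2 * (max prev_pos 0).toNat + (if cnt = 1 then 1 else 0)
decreasing_by exact pvStepA_decr a prev_pos cnt h

-- ===== PORT B =====
-- a[i] (B's reads are in range whenever A's are)
def pvAt (a : List Int) (i : Int) : Int := PySem.List.pyGetD a i 0

-- Source B's inner `for i in range(prev_pos-1,-1,-1): … nxt = i; break` = first positive slot below prev_pos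
def pvScanB (a : List Int) (p : Int) : Option Int :=
  (PySem.List.pyRange (p - 1) (-1) (-1)).find? (fun i => decide (0 < pvAt a i))

-- Source B's `while cnt == 1:` loop; returns the final prev_pos (the recorded chain only feeds the
-- batched mutations of `a`, which do not affect the return value and are dropped in the port)
def pvChase (a : List Int) (p : Int) (c : Int) : Int :=
  if c = 1 then
    match hm : pvScanB a p with
    | none => p
    | some i => pvChase a i (pvAt a i)
  else p
termination_by (max p 0).toNat
decreasing_by
  have hmem := List.mem_of_find?_eq_some hm
  rw [PySem.List.mem_pyRange_neg_one] at hmem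
  omega

def next_phase_impl_alt (a : List Int) (prev_pos : Int) (cnt : Int) : Int :=
  let s : Int × Int :=
    if cnt = 0 then
      match pvScanB a prev_pos with
      | some i => (i, pvAt a i)
      | none => (prev_pos, cnt)
    else (prev_pos, cnt)
  pvChase a s.1 s.2 + 1

-- ===== PRECONDITION & SPEC =====
-- Pre_ is EXACTLY the inputs on which Python A returns (no IndexError): every index the scans and
-- the two mutations touch (with Python's negative-index wraparound) must be in range; fuzz-verified exact.
def Pre_next_phase_impl (a : List Int) (prev_pos : Int) (cnt : Int) : Prop :=
  let n : Int := (a.length : Int)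
  let hp : Int → Bool := fun k => (a.take k.toNat).any (fun x => decide (0 < x))
  1 ≤ n ∧
  (if cnt = 1 then
    -n ≤ prev_pos ∧ (prev_pos ≤ n - 2 ∨ (prev_pos = n - 1 ∧ hp (n - 1) = true))
  else if cnt = 0 then
    (if prev_pos ≤ 0 then -n ≤ prev_pos ∧ prev_pos ≤ n - 2
     else prev_pos ≤ n ∧
       (if hp prev_pos = true then
          ¬(prev_pos = n ∧ 0 < PySem.List.pyGetD a (n - 1) 0 ∧
            (PySem.List.pyGetD a (n - 1) 0 ≠ 1 ∨ hp (n - 1) = false))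
        else prev_pos ≤ n - 2))
  else -n ≤ prev_pos ∧ prev_pos ≤ n - 2)
instance (a : List Int) (prev_pos : Int) (cnt : Int) : Decidable (Pre_next_phase_impl a prev_pos cnt) := by
  unfold Pre_next_phase_impl; infer_instance

def pvWitness_next_phase_impl : List Int × Int × Int := ([2, 1], 0, 0)

def Spec_next_phase_impl (a : List Int) (prev_pos : Int) (cnt : Int) (out : Int) : Prop := out = next_phase_impl_alt a prev_pos cnt
instance (a : List Int) (prev_pos : Int) (cnt : Int) (out : Int) : Decidable (Spec_next_phase_impl a prev_pos cnt out) := by unfold Spec_next_phase_impl; infer_instance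

-- ===== CLAIM (what is proved, stated in full; the proofs are below) =====
def Claim_equal_next_phase_impl : Prop := ∀ (a : List Int) (prev_pos : Int) (cnt : Int), Dom_next_phase_impl a prev_pos cnt → Pre_next_phase_impl a prev_pos cnt → Spec_next_phase_impl a prev_pos cnt (next_phase_impl a prev_pos cnt)

-- ===== LEMMAS AND PROOFS =====

-- A's hand-written scan equals B's find?-based scan
theorem pvFindPos_eq_find? (a : List Int) (l : List Int) :
    pvFindPos a l = l.find? (fun i => decide (0 < pvAt a i)) := by
  induction l with
  | nil => rfl
  | cons x xs ih =>
    by_cases h : 0 < pvAget a x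
    · rw [pvFindPos, if_pos h, List.find?_cons_of_pos (by simpa [pvAt, pvAget] using h)]
    · rw [pvFindPos, if_neg h, List.find?_cons_of_neg (by simpa [pvAt, pvAget] using h), ih]

theorem pvScanB_eq (a : List Int) (p : Int) :
    pvScanB a p = pvFindPos a (PySem.List.pyRange (p - 1) (-1) (-1)) := by
  rw [pvScanB, pvFindPos_eq_find?]

-- unfolding pvChase at c = 1 once the scan result is known
theorem pvChase_one_none (a : List Int) (p : Int) (h : pvScanB a p = none) :
    pvChase a p 1 = p := by
  rw [pvChase, if_pos rfl]
  split <;> simp_all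

theorem pvChase_one_some (a : List Int) (p i : Int) (h : pvScanB a p = some i) :
    pvChase a p 1 = pvChase a i (pvAt a i) := by
  rw [pvChase, if_pos rfl]
  split <;> simp_all

-- B with cnt = 0 computes the chase of (p, 1): both first scan below p and then chase the chain
theorem alt_zero_eq_chase (a : List Int) (p : Int) :
    next_phase_impl_alt a p 0 = pvChase a p 1 + 1 := by
  rw [next_phase_impl_alt]
  cases hm : pvScanB a p with
  | none =>
    have h0 : pvChase a p 0 = p := by rw [pvChase]; simp
    simp [h0, pvChase_one_none a p hm]
  | some i =>
    simp [pvChase_one_some a p i hm]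

theorem next_phase_impl_eq_alt (a : List Int) (p c : Int) :
    next_phase_impl a p c = next_phase_impl_alt a p c := by
  fun_induction next_phase_impl a p c with
  | case1 p c h ih =>
    rw [ih, show (pvStepA a p c).2 - 1 = 0 from by omega, alt_zero_eq_chase]
    by_cases hc : c = 0
    · subst hc
      cases hm : pvFindPos a (PySem.List.pyRange (p - 1) (-1) (-1)) with
      | none => exfalso; simp [pvStepA, hm] at h
      | some i =>
        have hscan : pvScanB a p = some i := by rw [pvScanB_eq]; exact hm
        have h1 : pvAt a i = 1 := by simpa [pvStepA, hm, pvAt, pvAget] using h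
        simp [pvStepA, hm, next_phase_impl_alt, hscan, h1]
    · have h1 : c = 1 := by simpa [pvStepA, hc] using h
      subst h1
      simp [pvStepA, next_phase_impl_alt]
  | case2 p c h =>
    by_cases hc : c = 0
    · subst hc
      cases hm : pvFindPos a (PySem.List.pyRange (p - 1) (-1) (-1)) with
      | none =>
        have hscan : pvScanB a p = none := by rw [pvScanB_eq]; exact hm
        rw [next_phase_impl_alt]
        simp only [pvStepA, hm, hscan]
        rw [pvChase]
        simp
      | some i =>
        have hscan : pvScanB a p = some i := by rw [pvScanB_eq]; exact hm
        have h1 : ¬ pvAt a i = 1 := by simpa [pvStepA, hm, pvAt, pvAget] using h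
        rw [next_phase_impl_alt]
        simp only [pvStepA, hm, hscan]
        rw [pvChase]
        simp [h1]
    · have h1 : ¬ c = 1 := by simpa [pvStepA, hc] using h
      rw [next_phase_impl_alt]
      simp only [pvStepA, if_neg hc]
      rw [pvChase]
      simp [h1]

-- ===== VERDICT (by name: the statement is the Claim_ definition above) =====
theorem next_phase_impl_spec : Claim_equal_next_phase_impl := by
  intro a p c _ _
  unfold Spec_next_phase_impl
  exact next_phase_impl_eq_alt a p c
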